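-- pv_equiv track=rewrite | github.com/sschan99/Algorithm | 프로그래머스/2/17677. ［1차］ 뉴스 클러스터링/［1차］ 뉴스 클러스터링.py | make_multiset
-- ===== SOURCE A (Python) =====
-- from collections import defaultdict
--
-- def make_multiset(string):
--     multiset = set()
--     counter = defaultdict(int)
--     for i in range(len(string) - 1):
--         a, b = string[i], string[i + 1]
--         if a.isalpha() and b.isalpha():
--             s = (a + b).lower()
--             multiset.add(s + str(counter[s]))
--             counter[s] += 1
--     return multiset
-- ===== SOURCE B (Python) =====
-- def make_multiset(string):
--     # pass 1: extract lowercased alphabetic bigrams in scan order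
--     bigrams = [(a + b).lower()
--                for a, b in zip(string, string[1:])
--                if a.isalpha() and b.isalpha()]
--     # pass 2: total count per bigram
--     remaining = {}
--     for s in bigrams:
--         remaining[s] = remaining.get(s, 0) + 1
--     # pass 3: walk backwards, decrementing, so each occurrence is tagged
--     # with the number of equal bigrams before it
--     tags = []
--     for s in reversed(bigrams):
--         remaining[s] -= 1
--         tags.append(s + str(remaining[s]))
--     return set(reversed(tags))
-- ===== Notes on version B (the rewrite author's own statement) =====
-- stated objective: alternative
-- what changed: A tags each bigram during a single indexed scan with a running defaultdict counter; B decomposes the task into three passes: extract the lowercased alphabetic bigrams by zipping the string with its tail, count total occurrences per bigram, then walk the bigram list backwards decrementing the counts so each occurrence is tagged with the number of equal bigrams before it, and return the set of tags.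
import Mathlib
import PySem

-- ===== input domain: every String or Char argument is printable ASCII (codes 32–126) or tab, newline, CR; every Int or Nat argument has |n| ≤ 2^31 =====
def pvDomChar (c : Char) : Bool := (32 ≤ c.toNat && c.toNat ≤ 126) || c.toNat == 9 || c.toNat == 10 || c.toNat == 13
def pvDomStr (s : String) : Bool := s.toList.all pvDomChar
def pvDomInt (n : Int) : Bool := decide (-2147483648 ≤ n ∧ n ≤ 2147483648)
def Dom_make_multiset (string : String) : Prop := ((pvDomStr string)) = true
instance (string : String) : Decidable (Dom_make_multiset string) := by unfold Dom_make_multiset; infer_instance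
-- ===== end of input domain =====

-- B replaces A's single indexed scan with a running per-bigram counter by three
-- passes: bigram extraction via zip, a counting pass, and a backwards
-- decrementing pass that tags each occurrence (alternative decomposition, same cost).

-- ===== PORT A =====
-- loop body of A (a, b are the two characters string[i], string[i+1])
def stepA (st : PySem.Set String × PySem.Dict String Int) (a b : Char) :
    PySem.Set String × PySem.Dict String Int :=
  if PySem.Chars.isalpha a && PySem.Chars.isalpha b then
    let s := String.ofList (PySem.Chars.lower [a, b])
    (PySem.Set.add st.1 (s ++ PySem.Int.toStr (st.2.getD s 0)),
     st.2.modify s 0 (· + 1))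
  else st

def make_multiset (string : String) : List String :=
  let cs := string.toList
  let st := (PySem.List.pyRange 0 (PySem.Str.len string - 1) 1).foldl
    (fun st i => stepA st (PySem.List.pyGetD cs i ' ') (PySem.List.pyGetD cs (i + 1) ' '))
    (PySem.Set.empty, PySem.Dict.empty)
  st.1

-- ===== PORT B =====
def make_multiset_alt (string : String) : List String :=
  let cs := string.toList
  let bigrams := ((cs.zip (cs.drop 1)).filter
      (fun p => PySem.Chars.isalpha p.1 && PySem.Chars.isalpha p.2)).map
      (fun p => String.ofList (PySem.Chars.lower [p.1, p.2]))
  let remaining := bigrams.foldl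
      (fun (d : PySem.Dict String Int) s => d.insert s (d.getD s 0 + 1))
      PySem.Dict.empty
  -- 'remaining[s] -= 1' (key always present) then read the new value
  let st := bigrams.reverse.foldl
      (fun (st : PySem.Dict String Int × List String) s =>
        let v := st.1.getD s 0 - 1
        (st.1.insert s v, st.2 ++ [s ++ PySem.Int.toStr v]))
      (remaining, ([] : List String))
  PySem.Set.ofList st.2.reverse

-- ===== PRECONDITION & SPEC =====
def Spec_make_multiset (string : String) (out : List String) : Prop := out = make_multiset_alt string
instance (string : String) (out : List String) : Decidable (Spec_make_multiset string out) := by unfold Spec_make_multiset; infer_instance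

-- ===== CLAIM (what is proved, stated in full; the proofs are below) =====
def Claim_equal_make_multiset : Prop := ∀ (string : String), Dom_make_multiset string → Spec_make_multiset string (make_multiset string)

-- ===== LEMMAS AND PROOFS =====

-- forward tag sequence: each element tagged with the running count so far (A's order)
def tagsA (d : PySem.Dict String Int) : List String → List String
  | [] => []
  | x :: xs => (x ++ PySem.Int.toStr (d.getD x 0)) :: tagsA (d.modify x 0 (· + 1)) xs

-- backward tag sequence: each element tagged with the decremented remaining count (B's order)
def tagsB (d : PySem.Dict String Int) : List String → List String
  | [] => []
  | x :: xs => (x ++ PySem.Int.toStr (d.getD x 0 - 1)) :: tagsB (d.insert x (d.getD x 0 - 1)) xs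

-- A's indexed loop is a fold over the list of adjacent pairs
lemma foldl_range_pairs {σ : Type} (cs : List Char) (f : σ → Char → Char → σ) (init : σ) :
    (PySem.List.pyRange 0 ((cs.length : Int) - 1) 1).foldl
      (fun st i => f st (PySem.List.pyGetD cs i ' ') (PySem.List.pyGetD cs (i + 1) ' ')) init
    = (cs.zip (cs.drop 1)).foldl (fun st p => f st p.1 p.2) init := by
  rcases cs with _ | ⟨c, cs'⟩
  · rw [PySem.List.pyRange_one_eq_nil (by norm_num)]
    rfl
  · have hlen : (((c :: cs').zip ((c :: cs').drop 1)).length : Int)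
        = ((c :: cs').length : Int) - 1 := by
      simp [List.length_zip]
    set ps := (c :: cs').zip ((c :: cs').drop 1) with hps
    rw [← hlen]
    rw [PySem.List.foldl_congr_mem _ _
        (fun st j => (fun st (p : Char × Char) => f st p.1 p.2) st
          (PySem.List.pyGetD ps j (' ', ' '))) init ?_]
    · have := PySem.List.foldl_pyRange_zero_pyGetD ps (' ', ' ')
        (fun st (p : Char × Char) => f st p.1 p.2) init
      simpa using this
    · intro acc i hi
      rw [PySem.List.mem_pyRange_one] at hi
      obtain ⟨h0, hlt⟩ := hi
      lift i to ℕ using h0 with k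
      have hk : k < ps.length := by exact_mod_cast hlt
      have hk1 : k < (c :: cs').length := by
        have := List.length_zip (l₁ := c :: cs') (l₂ := (c :: cs').drop 1)
        omega
      have hk2 : k + 1 < (c :: cs').length := by
        have := List.length_zip (l₁ := c :: cs') (l₂ := (c :: cs').drop 1)
        simp at this
        omega
      have h1 : PySem.List.pyGetD (c :: cs') (k : Int) ' ' = (c :: cs')[k] := by
        rw [PySem.List.pyGetD_natCast, List.getD_eq_getElem _ _ hk1]
      have h2 : PySem.List.pyGetD (c :: cs') ((k : Int) + 1) ' ' = (c :: cs')[k + 1] := by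
        have : ((k : Int) + 1) = ((k + 1 : ℕ) : Int) := by push_cast; ring
        rw [this, PySem.List.pyGetD_natCast, List.getD_eq_getElem _ _ hk2]
      have h3 : PySem.List.pyGetD ps (k : Int) (' ', ' ') = ps[k] := by
        rw [PySem.List.pyGetD_natCast, List.getD_eq_getElem _ _ hk]
      have h4 : ps[k] = ((c :: cs')[k], (c :: cs')[k + 1]) := by
        simp [hps, List.getElem_zip]
      simp only [h1, h2, h3, h4]

lemma foldA_fst (l : List String) :
    ∀ (st : PySem.Set String × PySem.Dict String Int),
    (l.foldl (fun st s =>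
        (PySem.Set.add st.1 (s ++ PySem.Int.toStr (st.2.getD s 0)),
         st.2.modify s 0 (· + 1))) st).1
    = (tagsA st.2 l).foldl PySem.Set.add st.1 := by
  induction l with
  | nil => intro st; rfl
  | cons x xs ih => intro st; simp [tagsA, ih]

-- the conditional fold of stepA is the unconditional fold over the filtered, mapped bigram list
lemma foldl_stepA_filter (ps : List (Char × Char)) :
    ∀ (st : PySem.Set String × PySem.Dict String Int),
    ps.foldl (fun st p => stepA st p.1 p.2) st
    = ((ps.filter (fun p => PySem.Chars.isalpha p.1 && PySem.Chars.isalpha p.2)).map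
        (fun p => String.ofList (PySem.Chars.lower [p.1, p.2]))).foldl
      (fun st s =>
        (PySem.Set.add st.1 (s ++ PySem.Int.toStr (st.2.getD s 0)),
         st.2.modify s 0 (· + 1))) st := by
  induction ps with
  | nil => intro st; rfl
  | cons p ps ih =>
    intro st
    rw [List.foldl_cons, ih]
    by_cases h : (PySem.Chars.isalpha p.1 && PySem.Chars.isalpha p.2) = true
    · simp [h, stepA]
    · simp [h, stepA]

lemma foldB_snd (l : List String) :
    ∀ (d : PySem.Dict String Int) (acc : List String),
    (l.foldl (fun (st : PySem.Dict String Int × List String) s =>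
        let v := st.1.getD s 0 - 1
        (st.1.insert s v, st.2 ++ [s ++ PySem.Int.toStr v])) (d, acc)).2
    = acc ++ tagsB d l := by
  induction l with
  | nil => intro d acc; simp [tagsB]
  | cons x xs ih => intro d acc; simp [tagsB, ih]

lemma tagsA_append (ys zs : List String) :
    ∀ d, tagsA d (ys ++ zs)
      = tagsA d ys ++ tagsA (ys.foldl (fun d y => d.modify y 0 (· + 1)) d) zs := by
  induction ys with
  | nil => intro d; rfl
  | cons y ys ih => intro d; simp [tagsA, ih]

-- decrement-backwards tagging equals count-forwards tagging
lemma tagsB_reverse (r : List String) :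
    ∀ (d dA : PySem.Dict String Int),
    (∀ s, d.getD s 0 = dA.getD s 0 + r.reverse.count s) →
    (tagsB d r).reverse = tagsA dA r.reverse := by
  induction r with
  | nil => intro d dA h; rfl
  | cons x rs ih =>
    intro d dA h
    have hxc := h x
    rw [List.reverse_cons, List.count_append] at hxc
    have hcx : List.count x [x] = 1 := by simp
    have hIH : ∀ s, (d.insert x (d.getD x 0 - 1)).getD s 0
        = dA.getD s 0 + rs.reverse.count s := by
      intro s
      have hs := h s
      rw [List.reverse_cons, List.count_append] at hs
      rw [PySem.Dict.getD_insert]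
      by_cases hsx : s = x
      · subst hsx
        have h1 : List.count s [s] = 1 := by simp
        rw [if_pos rfl]
        omega
      · have h0 : List.count s [x] = 0 := List.count_eq_zero.mpr (by simp [hsx])
        rw [if_neg hsx]
        omega
    have hrs := ih _ _ hIH
    rw [show tagsB d (x :: rs)
          = (x ++ PySem.Int.toStr (d.getD x 0 - 1))
            :: tagsB (d.insert x (d.getD x 0 - 1)) rs from rfl]
    rw [List.reverse_cons, hrs, List.reverse_cons, tagsA_append]
    have hmod : (rs.reverse.foldl (fun d y => d.modify y 0 (· + 1)) dA).getD x 0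
        = dA.getD x 0 + rs.reverse.count x :=
      PySem.Dict.getD_foldl_modify_add_one _ _ _
    rw [show tagsA (rs.reverse.foldl (fun d y => d.modify y 0 (· + 1)) dA) [x]
        = [x ++ PySem.Int.toStr
            ((rs.reverse.foldl (fun d y => d.modify y 0 (· + 1)) dA).getD x 0)] from rfl]
    rw [hmod]
    have hval : d.getD x 0 - 1 = dA.getD x 0 + rs.reverse.count x := by omega
    rw [hval]

-- ===== VERDICT (by name: the statement is the Claim_ definition above) =====
theorem make_multiset_spec : Claim_equal_make_multiset := by
  intro string _
  show make_multiset string = make_multiset_alt string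
  unfold make_multiset make_multiset_alt
  rw [PySem.Str.len_eq]
  have hA := foldl_range_pairs string.toList (fun st a b => stepA st a b)
      (PySem.Set.empty, PySem.Dict.empty)
  dsimp only
  rw [hA, foldl_stepA_filter, foldA_fst, foldB_snd]
  set bigrams := ((string.toList.zip (string.toList.drop 1)).filter
      (fun p => PySem.Chars.isalpha p.1 && PySem.Chars.isalpha p.2)).map
      (fun p => String.ofList (PySem.Chars.lower [p.1, p.2])) with hbg
  have hcnt : ∀ s, (bigrams.foldl
      (fun (d : PySem.Dict String Int) s => d.insert s (d.getD s 0 + 1))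
      PySem.Dict.empty).getD s 0
      = PySem.Dict.empty.getD s 0 + bigrams.reverse.reverse.count s := by
    intro s
    simp [PySem.Dict.getD_foldl_insert_add_one]
  have := tagsB_reverse bigrams.reverse _ PySem.Dict.empty hcnt
  simp only [List.reverse_reverse] at this
  rw [List.nil_append, this, PySem.Set.ofList_eq_foldl]
  rfl
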